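-- pv_equiv track=rewrite | github.com/none44353/creative-problem-solving | utils/optimization.py | get_key_parameters
-- ===== SOURCE A (Python) =====
-- def get_key_parameters(X, key_parameters):
--     Y = []
--     for item in X:
--         new_tuple = []
--         if "self" in key_parameters:
--             new_tuple.append(item[0])
--         if "prompt" in key_parameters:
--             new_tuple.append(item[1])
--         if "peer" in key_parameters:
--             new_tuple.append(item[2])
--         Y.append(tuple(new_tuple))
--     return Y
-- ===== SOURCE B (Python) =====
-- def get_key_parameters(X, key_parameters):
--     # Column-wise: extract each selected column in its own pass, then
--     # transpose the columns back into row tuples with zip.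
--     cols = []
--     if "self" in key_parameters:
--         cols.append([item[0] for item in X])
--     if "prompt" in key_parameters:
--         cols.append([item[1] for item in X])
--     if "peer" in key_parameters:
--         cols.append([item[2] for item in X])
--     if not cols:
--         return [() for _ in X]
--     return list(zip(*cols))
-- ===== Notes on version B (the rewrite author's own statement) =====
-- stated objective: faster
-- what changed: B works column-wise: it extracts each selected column of X in its own bulk pass and then transposes the columns back into row tuples with zip, instead of A's single row-wise pass with per-item membership tests and appends.
import Mathlib
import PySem

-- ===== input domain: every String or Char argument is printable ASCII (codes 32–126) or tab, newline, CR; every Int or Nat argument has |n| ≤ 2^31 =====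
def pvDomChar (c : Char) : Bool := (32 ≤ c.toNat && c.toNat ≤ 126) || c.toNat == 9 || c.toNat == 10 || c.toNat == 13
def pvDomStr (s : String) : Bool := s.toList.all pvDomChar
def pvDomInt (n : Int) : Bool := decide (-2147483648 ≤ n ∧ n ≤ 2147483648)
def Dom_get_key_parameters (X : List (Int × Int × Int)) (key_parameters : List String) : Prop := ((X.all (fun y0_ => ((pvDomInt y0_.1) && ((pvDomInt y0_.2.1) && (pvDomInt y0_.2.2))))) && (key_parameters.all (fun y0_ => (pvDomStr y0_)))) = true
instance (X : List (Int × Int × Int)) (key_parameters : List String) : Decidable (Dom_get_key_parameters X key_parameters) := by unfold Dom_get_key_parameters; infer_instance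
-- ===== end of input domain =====

-- B rebuilds the result column-wise (one pass per selected column, then a zip-transpose)
-- instead of A's single row-wise pass with per-item membership branches (objective: alternative).
-- ===== PORT A =====
def get_key_parameters (X : List (Int × Int × Int)) (key_parameters : List String) : List (List Int) :=
  X.foldl (fun Y item =>
    let new_tuple : List Int := []
    let new_tuple := if key_parameters.contains "self" then new_tuple ++ [item.1] else new_tuple
    let new_tuple := if key_parameters.contains "prompt" then new_tuple ++ [item.2.1] else new_tuple
    let new_tuple := if key_parameters.contains "peer" then new_tuple ++ [item.2.2] else new_tuple
    Y ++ [new_tuple]) []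

-- ===== PORT B =====
-- Python's zip(*cols): take the head of every column, recurse on the tails,
-- stop as soon as some column is exhausted (exact for zip's shortest-input rule).
-- (termination measure helper, cited by pvZipCols's decreasing_by)
theorem pv_tails_sum_le (cs : List (List Int)) :
    ((cs.map (fun c => c.tail)).map List.length).sum ≤ (cs.map List.length).sum := by
  induction cs with
  | nil => simp
  | cons d ds ih =>
      simp only [List.map_cons, List.sum_cons]
      have hd : d.tail.length ≤ d.length := by cases d <;> simp
      exact Nat.add_le_add hd ih

def pvZipCols (cols : List (List Int)) : List (List Int) :=
  if h : cols.any (·.isEmpty) ∨ cols = [] then []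
  else
    (cols.map (fun c => c.headI)) :: pvZipCols (cols.map (fun c => c.tail))
termination_by (cols.map List.length).sum
decreasing_by
  have h1 : ∀ c ∈ cols, c ≠ [] := by
    intro c hc hcnil
    exact h (Or.inl (List.any_eq_true.mpr ⟨c, hc, by simp [hcnil]⟩))
  have h2 : cols ≠ [] := fun a => h (Or.inr a)
  rcases cols with _ | ⟨c, cs⟩
  · exact absurd rfl h2
  · have hc : c ≠ [] := h1 c (by simp)
    rcases c with _ | ⟨a, c'⟩
    · exact absurd rfl hc
    · have key : ((cs.map (fun c => c.tail)).map List.length).sum ≤ (cs.map List.length).sum :=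
        pv_tails_sum_le cs
      simp only [List.map_attach_eq_pmap, List.pmap_eq_map, List.map_cons, List.sum_cons,
        List.length_cons, List.tail_cons, List.map_map, Function.comp_def] at key ⊢
      omega

def get_key_parameters_alt (X : List (Int × Int × Int)) (key_parameters : List String) : List (List Int) :=
  let cols : List (List Int) := []
  let cols := if key_parameters.contains "self" then cols ++ [X.map (fun item => item.1)] else cols
  let cols := if key_parameters.contains "prompt" then cols ++ [X.map (fun item => item.2.1)] else cols
  let cols := if key_parameters.contains "peer" then cols ++ [X.map (fun item => item.2.2)] else cols
  if cols = [] then X.map (fun _ => []) else pvZipCols cols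

-- ===== PRECONDITION & SPEC =====
def Spec_get_key_parameters (X : List (Int × Int × Int)) (key_parameters : List String) (out : List (List Int)) : Prop := out = get_key_parameters_alt X key_parameters
instance (X : List (Int × Int × Int)) (key_parameters : List String) (out : List (List Int)) : Decidable (Spec_get_key_parameters X key_parameters out) := by unfold Spec_get_key_parameters; infer_instance

-- ===== CLAIM (what is proved, stated in full; the proofs are below) =====
def Claim_equal_get_key_parameters : Prop := ∀ (X : List (Int × Int × Int)) (key_parameters : List String), Dom_get_key_parameters X key_parameters → Spec_get_key_parameters X key_parameters (get_key_parameters X key_parameters)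

-- ===== LEMMAS AND PROOFS =====
theorem pv_foldl_append {α β : Type} (f : α → β) (X : List α) (acc : List β) :
    X.foldl (fun Y item => Y ++ [f item]) acc = acc ++ X.map f := by
  induction X generalizing acc with
  | nil => simp
  | cons x xs ih => simp [List.foldl, ih]

theorem pv_zip1 {α : Type} (f : α → Int) (X : List α) :
    pvZipCols [X.map f] = X.map (fun x => [f x]) := by
  induction X with
  | nil => simp [pvZipCols]
  | cons x xs ih => rw [pvZipCols]; simp [ih]

theorem pv_zip2 {α : Type} (f g : α → Int) (X : List α) :
    pvZipCols [X.map f, X.map g] = X.map (fun x => [f x, g x]) := by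
  induction X with
  | nil => simp [pvZipCols]
  | cons x xs ih => rw [pvZipCols]; simp [ih]

theorem pv_zip3 {α : Type} (f g h : α → Int) (X : List α) :
    pvZipCols [X.map f, X.map g, X.map h] = X.map (fun x => [f x, g x, h x]) := by
  induction X with
  | nil => simp [pvZipCols]
  | cons x xs ih => rw [pvZipCols]; simp [ih]

-- ===== VERDICT (by name: the statement is the Claim_ definition above) =====
theorem get_key_parameters_spec : Claim_equal_get_key_parameters := by
  intro X kp _
  show get_key_parameters X kp = get_key_parameters_alt X kp
  unfold get_key_parameters get_key_parameters_alt
  rw [pv_foldl_append]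
  by_cases hs : "self" ∈ kp <;> by_cases hp : "prompt" ∈ kp <;>
    by_cases hr : "peer" ∈ kp <;>
    simp [hs, hp, hr, pv_zip1, pv_zip2, pv_zip3]
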